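-- pv_equiv track=rewrite | github.com/Gytis0/Exercise-Snake-Game | display.py | get_current_frame
-- ===== SOURCE A (Python) =====
-- def get_current_frame(snakePosX, snakePosY, foodPosX, foodPosY, snake_color=(0, 255, 0), food_color=(255, 0, 0)):
--     """
--     Returns the current frame as a flat list of 64 RGB tuples
--     with the snake and food drawn on it.
--     """
--     frame = [(0, 0, 0)] * 64
--
--     for x, y in zip(snakePosX, snakePosY):
--         if 0 <= x < 8 and 0 <= y < 8:
--             frame[y * 8 + x] = snake_color
--
--     if 0 <= foodPosX < 8 and 0 <= foodPosY < 8: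
--         frame[foodPosY * 8 + foodPosX] = food_color
--
--     return frame
-- ===== SOURCE B (Python) =====
-- def get_current_frame(snakePosX, snakePosY, foodPosX, foodPosY, snake_color=(0, 255, 0), food_color=(255, 0, 0)):
--     pairs = list(zip(snakePosX, snakePosY))
--     def cell(i):
--         x = i % 8
--         y = i // 8
--         if 0 <= foodPosX < 8 and 0 <= foodPosY < 8 and x == foodPosX and y == foodPosY:
--             return food_color
--         if (x, y) in pairs:
--             return snake_color
--         return (0, 0, 0)
--     return [cell(i) for i in range(64)]
-- ===== Notes on version B (the rewrite author's own statement) =====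
-- stated objective: alternative
-- what changed: B never scatter-writes or filters coordinates: for each of the 64 cells it decodes (x,y) = (i%8, i//8) and decides its colour by comparing against the food position and a tuple-membership test on the raw zipped snake pairs (out-of-bounds pairs can never match a decoded cell, so A's bounds filter disappears).
import Mathlib
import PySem

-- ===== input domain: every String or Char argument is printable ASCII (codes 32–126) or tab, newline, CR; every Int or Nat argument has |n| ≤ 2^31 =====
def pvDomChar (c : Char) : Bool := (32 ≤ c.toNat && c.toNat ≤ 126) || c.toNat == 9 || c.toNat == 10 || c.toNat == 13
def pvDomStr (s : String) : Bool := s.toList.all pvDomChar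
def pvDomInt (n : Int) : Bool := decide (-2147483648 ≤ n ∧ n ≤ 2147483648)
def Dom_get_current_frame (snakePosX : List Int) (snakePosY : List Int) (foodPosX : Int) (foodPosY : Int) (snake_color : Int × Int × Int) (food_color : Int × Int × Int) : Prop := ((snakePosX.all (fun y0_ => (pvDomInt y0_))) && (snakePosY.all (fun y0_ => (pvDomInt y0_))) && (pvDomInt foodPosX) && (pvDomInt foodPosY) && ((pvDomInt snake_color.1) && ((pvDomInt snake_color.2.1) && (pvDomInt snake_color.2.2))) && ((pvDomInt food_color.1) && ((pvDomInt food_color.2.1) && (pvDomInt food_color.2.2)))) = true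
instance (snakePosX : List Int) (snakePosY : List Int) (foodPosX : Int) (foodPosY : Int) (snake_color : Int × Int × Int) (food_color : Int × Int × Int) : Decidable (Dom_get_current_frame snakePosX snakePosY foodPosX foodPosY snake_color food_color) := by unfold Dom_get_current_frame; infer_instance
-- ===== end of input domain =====

-- B replaces A's scatter writes into a mutable buffer by a per-cell decision: each cell i
-- decodes its coordinates (i%8, i//8) and tests them against the food position and the raw
-- zipped snake pairs (no bounds filter, no buffer mutation); objective: alternative.


-- ===== PORT A =====
-- literal transliteration of A: in-range writes into a 64-cell buffer, then the food overwrite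
def get_current_frame (snakePosX : List Int) (snakePosY : List Int) (foodPosX : Int) (foodPosY : Int) (snake_color : Int × Int × Int) (food_color : Int × Int × Int) : List (Int × Int × Int) :=
  let frame := List.replicate 64 ((0 : Int), (0 : Int), (0 : Int))
  let frame := (snakePosX.zip snakePosY).foldl
    (fun fr p =>
      if 0 ≤ p.1 ∧ p.1 < 8 ∧ 0 ≤ p.2 ∧ p.2 < 8 then
        PySem.List.pySetD fr (p.2 * 8 + p.1) snake_color
      else fr) frame
  if 0 ≤ foodPosX ∧ foodPosX < 8 ∧ 0 ≤ foodPosY ∧ foodPosY < 8 then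
    PySem.List.pySetD frame (foodPosY * 8 + foodPosX) food_color
  else frame

-- ===== PORT B =====
-- literal transliteration of B: per cell i, decode (x,y) = (i%8, i//8) and pick the colour by
-- comparing with the food position and by tuple membership in the raw zipped snake pairs
def get_current_frame_alt (snakePosX : List Int) (snakePosY : List Int) (foodPosX : Int) (foodPosY : Int) (snake_color : Int × Int × Int) (food_color : Int × Int × Int) : List (Int × Int × Int) :=
  let pairs := snakePosX.zip snakePosY
  (PySem.List.pyRange 0 64 1).map (fun i =>
    let x := PySem.Int.mod i 8
    let y := PySem.Int.floordiv i 8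
    if (0 ≤ foodPosX ∧ foodPosX < 8 ∧ 0 ≤ foodPosY ∧ foodPosY < 8) ∧ x = foodPosX ∧ y = foodPosY then
      food_color
    else if pairs.contains (x, y) then snake_color
    else ((0 : Int), (0 : Int), (0 : Int)))

-- ===== PRECONDITION & SPEC =====
def Spec_get_current_frame (snakePosX : List Int) (snakePosY : List Int) (foodPosX : Int) (foodPosY : Int) (snake_color : Int × Int × Int) (food_color : Int × Int × Int) (out : List (Int × Int × Int)) : Prop := out = get_current_frame_alt snakePosX snakePosY foodPosX foodPosY snake_color food_color
instance (snakePosX : List Int) (snakePosY : List Int) (foodPosX : Int) (foodPosY : Int) (snake_color : Int × Int × Int) (food_color : Int × Int × Int) (out : List (Int × Int × Int)) : Decidable (Spec_get_current_frame snakePosX snakePosY foodPosX foodPosY snake_color food_color out) := by unfold Spec_get_current_frame; infer_instance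

-- ===== CLAIM (what is proved, stated in full; the proofs are below) =====
def Claim_equal_get_current_frame : Prop := ∀ (snakePosX : List Int) (snakePosY : List Int) (foodPosX : Int) (foodPosY : Int) (snake_color : Int × Int × Int) (food_color : Int × Int × Int), Dom_get_current_frame snakePosX snakePosY foodPosX foodPosY snake_color food_color → Spec_get_current_frame snakePosX snakePosY foodPosX foodPosY snake_color food_color (get_current_frame snakePosX snakePosY foodPosX foodPosY snake_color food_color)

-- ===== LEMMAS AND PROOFS =====

-- the snake-drawing fold of port A, as an abbreviation for the proofs
def pvSetOp (c : Int × Int × Int) (fr : List (Int × Int × Int)) (p : Int × Int) : List (Int × Int × Int) :=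
  if 0 ≤ p.1 ∧ p.1 < 8 ∧ 0 ≤ p.2 ∧ p.2 < 8 then PySem.List.pySetD fr (p.2 * 8 + p.1) c else fr

lemma pvLenSetOp (c : Int × Int × Int) (fr : List (Int × Int × Int)) (p : Int × Int) :
    (pvSetOp c fr p).length = fr.length := by
  unfold pvSetOp
  split
  · exact PySem.List.length_pySetD _ _ _
  · rfl

lemma pvLenA (c : Int × Int × Int) (zs : List (Int × Int)) (fr : List (Int × Int × Int)) :
    (zs.foldl (pvSetOp c) fr).length = fr.length := by
  induction zs generalizing fr with
  | nil => rfl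
  | cons p zs ih => rw [List.foldl_cons, ih, pvLenSetOp]

-- cell j of A's snake fold: snake colour iff some in-bounds pair writes j, else the old cell
lemma pvGetA (c : Int × Int × Int) (zs : List (Int × Int)) (fr : List (Int × Int × Int))
    (h64 : fr.length = 64) (j : Nat) (hj : j < 64) :
    (zs.foldl (pvSetOp c) fr)[j]?
      = if ∃ p ∈ zs, (0 ≤ p.1 ∧ p.1 < 8 ∧ 0 ≤ p.2 ∧ p.2 < 8) ∧ p.2 * 8 + p.1 = (j : Int) then
          some c
        else fr[j]? := by
  induction zs generalizing fr with
  | nil => simp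
  | cons p zs ih =>
    rw [List.foldl_cons, ih (pvSetOp c fr p) (by rw [pvLenSetOp]; exact h64)]
    simp only [List.exists_mem_cons_iff]
    by_cases hp : 0 ≤ p.1 ∧ p.1 < 8 ∧ 0 ≤ p.2 ∧ p.2 < 8
    · have hk : 0 ≤ p.2 * 8 + p.1 ∧ p.2 * 8 + p.1 < 64 := by obtain ⟨a, b, d, e⟩ := hp; omega
      have hset : pvSetOp c fr p = fr.set (p.2 * 8 + p.1).toNat c := by
        unfold pvSetOp; rw [if_pos hp, PySem.List.pySetD_of_nonneg fr c hk.1]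
      rw [hset, List.getElem?_set, h64]
      by_cases hz : ∃ q ∈ zs, (0 ≤ q.1 ∧ q.1 < 8 ∧ 0 ≤ q.2 ∧ q.2 < 8) ∧ q.2 * 8 + q.1 = (j : Int)
      · rw [if_pos hz, if_pos (Or.inr hz)]
      · rw [if_neg hz]
        by_cases he : (p.2 * 8 + p.1).toNat = j
        · rw [if_pos he, if_pos (by omega), if_pos (Or.inl ⟨hp, by omega⟩)]
        · rw [if_neg he, if_neg (by
            rintro (⟨_, h⟩ | h)
            · exact he (by omega)
            · exact hz h)]
    · have hskip : pvSetOp c fr p = fr := by unfold pvSetOp; rw [if_neg hp]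
      rw [hskip]
      by_cases hz : ∃ q ∈ zs, (0 ≤ q.1 ∧ q.1 < 8 ∧ 0 ≤ q.2 ∧ q.2 < 8) ∧ q.2 * 8 + q.1 = (j : Int)
      · rw [if_pos hz, if_pos (Or.inr hz)]
      · rw [if_neg hz, if_neg (by
          rintro (⟨h, _⟩ | h)
          · exact hp h
          · exact hz h)]

-- for 0 ≤ i < 64, a snake pair writes cell i iff it decodes to (i%8, i//8)
lemma pvDecode (zs : List (Int × Int)) (i : Int) (h0 : 0 ≤ i) (h64 : i < 64) :
    ((PySem.Int.mod i 8, PySem.Int.floordiv i 8) ∈ zs)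
      ↔ ∃ p ∈ zs, (0 ≤ p.1 ∧ p.1 < 8 ∧ 0 ≤ p.2 ∧ p.2 < 8) ∧ p.2 * 8 + p.1 = i := by
  rw [PySem.Int.mod_eq_emod_of_pos (by norm_num), PySem.Int.floordiv_eq_ediv_of_pos (by norm_num)]
  constructor
  · intro hm
    refine ⟨(i % 8, i / 8), hm, ⟨by omega, by omega, by omega, by omega⟩, by omega⟩
  · rintro ⟨p, hm, ⟨a, b, d, e⟩, hw⟩
    have hx : p.1 = i % 8 := by omega
    have hy : p.2 = i / 8 := by omega
    rwa [← hx, ← hy, Prod.mk.eta]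

-- ===== VERDICT (by name: the statement is the Claim_ definition above) =====
theorem get_current_frame_spec : Claim_equal_get_current_frame := by
  intro sx sy fx fy sc fc _
  unfold Spec_get_current_frame get_current_frame get_current_frame_alt
  have hF : (((sx.zip sy).foldl (pvSetOp sc) (List.replicate 64 ((0:Int),(0:Int),(0:Int)))).length) = 64 := by
    rw [pvLenA, List.length_replicate]
  apply List.ext_getElem?
  intro j
  show (if 0 ≤ fx ∧ fx < 8 ∧ 0 ≤ fy ∧ fy < 8 then
      PySem.List.pySetD ((sx.zip sy).foldl (pvSetOp sc) (List.replicate 64 ((0:Int),(0:Int),(0:Int))))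
        (fy * 8 + fx) fc
    else (sx.zip sy).foldl (pvSetOp sc) (List.replicate 64 ((0:Int),(0:Int),(0:Int))))[j]?
    = ((PySem.List.pyRange 0 64 1).map (fun i =>
        if (0 ≤ fx ∧ fx < 8 ∧ 0 ≤ fy ∧ fy < 8) ∧ PySem.Int.mod i 8 = fx ∧ PySem.Int.floordiv i 8 = fy then fc
        else if (sx.zip sy).contains (PySem.Int.mod i 8, PySem.Int.floordiv i 8) then sc
        else ((0:Int),(0:Int),(0:Int))))[j]?
  by_cases hj : j < 64
  · have hR := PySem.List.getElem?_map_pyRange_zero (fun i =>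
        if (0 ≤ fx ∧ fx < 8 ∧ 0 ≤ fy ∧ fy < 8) ∧ PySem.Int.mod i 8 = fx ∧ PySem.Int.floordiv i 8 = fy then fc
        else if (sx.zip sy).contains (PySem.Int.mod i 8, PySem.Int.floordiv i 8) then sc
        else ((0:Int),(0:Int),(0:Int))) 64 j hj
    rw [show ((64 : Nat) : Int) = 64 from rfl] at hR
    rw [hR]
    beta_reduce
    have hmod : PySem.Int.mod ((j : Nat) : Int) 8 = ((j : Nat) : Int) % 8 :=
      PySem.Int.mod_eq_emod_of_pos (by norm_num)
    have hdiv : PySem.Int.floordiv ((j : Nat) : Int) 8 = ((j : Nat) : Int) / 8 :=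
      PySem.Int.floordiv_eq_ediv_of_pos (by norm_num)
    have hsnake := pvGetA sc (sx.zip sy) (List.replicate 64 ((0:Int),(0:Int),(0:Int)))
      List.length_replicate j hj
    have hcont : (sx.zip sy).contains (PySem.Int.mod ((j:Nat):Int) 8, PySem.Int.floordiv ((j:Nat):Int) 8) = true
        ↔ ∃ p ∈ sx.zip sy, (0 ≤ p.1 ∧ p.1 < 8 ∧ 0 ≤ p.2 ∧ p.2 < 8) ∧ p.2 * 8 + p.1 = (j : Int) :=
      (List.contains_iff_mem).trans (pvDecode _ _ (by omega) (by exact_mod_cast hj))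
    by_cases hfood : 0 ≤ fx ∧ fx < 8 ∧ 0 ≤ fy ∧ fy < 8
    · rw [if_pos hfood,
        PySem.List.pySetD_of_nonneg _ fc (by obtain ⟨a, b, d, e⟩ := hfood; omega),
        List.getElem?_set, hF]
      by_cases he : (fy * 8 + fx).toNat = j
      · rw [if_pos he, if_pos (by omega),
          if_pos (show (0 ≤ fx ∧ fx < 8 ∧ 0 ≤ fy ∧ fy < 8) ∧
              PySem.Int.mod ((j:Nat):Int) 8 = fx ∧ PySem.Int.floordiv ((j:Nat):Int) 8 = fy from
            ⟨hfood, by rw [hmod]; obtain ⟨a, b, d, e⟩ := hfood; omega,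
              by rw [hdiv]; obtain ⟨a, b, d, e⟩ := hfood; omega⟩)]
      · have hne : ¬ ((0 ≤ fx ∧ fx < 8 ∧ 0 ≤ fy ∧ fy < 8) ∧
            PySem.Int.mod ((j:Nat):Int) 8 = fx ∧ PySem.Int.floordiv ((j:Nat):Int) 8 = fy) := by
          rw [hmod, hdiv]; rintro ⟨⟨a, b, d, e⟩, hx, hy⟩; omega
        rw [if_neg he, hsnake, if_neg hne]
        by_cases hm : ∃ p ∈ sx.zip sy, (0 ≤ p.1 ∧ p.1 < 8 ∧ 0 ≤ p.2 ∧ p.2 < 8) ∧ p.2 * 8 + p.1 = (j : Int)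
        · rw [if_pos hm, if_pos (hcont.mpr hm)]
        · rw [if_neg hm, if_neg (fun h => hm (hcont.mp h)),
            List.getElem?_replicate, if_pos hj]
    · have hne : ¬ ((0 ≤ fx ∧ fx < 8 ∧ 0 ≤ fy ∧ fy < 8) ∧
          PySem.Int.mod ((j:Nat):Int) 8 = fx ∧ PySem.Int.floordiv ((j:Nat):Int) 8 = fy) :=
        fun h => hfood h.1
      rw [if_neg hfood, hsnake, if_neg hne]
      by_cases hm : ∃ p ∈ sx.zip sy, (0 ≤ p.1 ∧ p.1 < 8 ∧ 0 ≤ p.2 ∧ p.2 < 8) ∧ p.2 * 8 + p.1 = (j : Int)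
      · rw [if_pos hm, if_pos (hcont.mpr hm)]
      · rw [if_neg hm, if_neg (fun h => hm (hcont.mp h)),
          List.getElem?_replicate, if_pos hj]
  · rw [List.getElem?_eq_none (by
      split
      · rw [PySem.List.length_pySetD, hF]; omega
      · rw [hF]; omega),
    List.getElem?_eq_none (by
      rw [List.length_map, PySem.List.length_pyRange_one]; omega)]
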